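-- pv_equiv track=rewrite | github.com/timelordy/UniTools-EOM | tests/test_hub_pyrevit_command.py | _slice_between
-- ===== SOURCE A (Python) =====
-- def _slice_between(lines, start_marker, end_marker):
--     start = None
--     end = None
--     for idx, line in enumerate(lines):
--         if start is None and start_marker in line:
--             start = idx
--             continue
--         if start is not None and end_marker in line:
--             end = idx
--             break
--     if start is None:
--         return []
--     return lines[start : end if end is not None else len(lines)]
-- ===== SOURCE B (Python) =====
-- def _slice_between(lines, start_marker, end_marker):
--     it = iter(lines)
--     for line in it:
--         if start_marker in line:
--             out = [line]
--             for rest in it: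
--                 if end_marker in rest:
--                     break
--                 out.append(rest)
--             return out
--     return []
-- ===== Notes on version B (the rewrite author's own statement) =====
-- stated objective: alternative
-- what changed: B never computes indices or slices: it consumes a shared iterator, and once a start-marker line is seen it builds the result list directly by accumulating lines until the end marker, instead of A's stateful index bookkeeping (start/end) followed by lines[start:end].
import Mathlib
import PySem

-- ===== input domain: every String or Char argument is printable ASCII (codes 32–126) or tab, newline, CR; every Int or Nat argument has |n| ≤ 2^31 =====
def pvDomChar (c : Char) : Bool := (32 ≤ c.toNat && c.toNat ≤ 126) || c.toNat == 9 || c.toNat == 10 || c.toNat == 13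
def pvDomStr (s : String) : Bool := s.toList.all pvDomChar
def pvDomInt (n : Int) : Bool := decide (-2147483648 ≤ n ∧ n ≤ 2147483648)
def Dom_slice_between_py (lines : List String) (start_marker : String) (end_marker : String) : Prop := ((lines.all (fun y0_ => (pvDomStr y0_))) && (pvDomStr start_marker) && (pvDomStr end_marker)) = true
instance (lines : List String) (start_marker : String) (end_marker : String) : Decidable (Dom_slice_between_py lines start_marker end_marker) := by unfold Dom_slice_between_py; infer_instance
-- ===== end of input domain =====

-- B abandons A's index bookkeeping and slicing entirely: it streams the lines,
-- and on seeing a start-marker line accumulates lines directly until the end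
-- marker; objective: alternative (same cost, no indices or slicing).

-- ===== PORT A =====
-- A's for-loop over enumerate(lines) with state (start, end) and early break:
-- returns the final (start, end) pair.
def sliceBetweenLoopA (start_marker end_marker : String) :
    List String → Nat → Option Nat → Option Nat × Option Nat
  | [], _, start => (start, none)
  | line :: rest, idx, start =>
    match start with
    | none =>
      if PySem.Str.isIn start_marker line then
        sliceBetweenLoopA start_marker end_marker rest (idx + 1) (some idx)
      else
        sliceBetweenLoopA start_marker end_marker rest (idx + 1) none
    | some s =>
      if PySem.Str.isIn end_marker line then (some s, some idx)
      else sliceBetweenLoopA start_marker end_marker rest (idx + 1) (some s)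

def slice_between_py (lines : List String) (start_marker : String) (end_marker : String) : List String :=
  match sliceBetweenLoopA start_marker end_marker lines 0 none with
  | (none, _) => []
  | (some s, e?) =>
    PySem.List.slice lines (some (s : Int))
      (some (match e? with | some e => (e : Int) | none => (lines.length : Int)))

-- ===== PORT B =====
-- B's inner loop: accumulate lines until one contains the end marker.
def sliceBetweenScanB (end_marker : String) : List String → List String
  | [] => []
  | line :: rest =>
    if PySem.Str.isIn end_marker line then []
    else line :: sliceBetweenScanB end_marker rest

def slice_between_py_alt (lines : List String) (start_marker : String) (end_marker : String) : List String :=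
  match lines with
  | [] => []
  | line :: rest =>
    if PySem.Str.isIn start_marker line then
      line :: sliceBetweenScanB end_marker rest
    else
      slice_between_py_alt rest start_marker end_marker

-- ===== PRECONDITION & SPEC =====
def Spec_slice_between_py (lines : List String) (start_marker : String) (end_marker : String) (out : List String) : Prop := out = slice_between_py_alt lines start_marker end_marker
instance (lines : List String) (start_marker : String) (end_marker : String) (out : List String) : Decidable (Spec_slice_between_py lines start_marker end_marker out) := by unfold Spec_slice_between_py; infer_instance

-- ===== CLAIM =====
def Claim_equal_slice_between_py : Prop := ∀ (lines : List String) (start_marker : String) (end_marker : String), Dom_slice_between_py lines start_marker end_marker → Spec_slice_between_py lines start_marker end_marker (slice_between_py lines start_marker end_marker)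

-- ===== LEMMAS AND PROOFS =====

-- Once start is set, A's loop leaves it fixed and searches for the end marker.
theorem sliceBetweenLoopA_some (sm em : String) (xs : List String) (idx s : Nat) :
    sliceBetweenLoopA sm em xs idx (some s)
      = (some s, (xs.findIdx? (fun l => PySem.Str.isIn em l)).map (fun j => idx + j)) := by
  induction xs generalizing idx with
  | nil => simp [sliceBetweenLoopA]
  | cons h t ih =>
    by_cases hq : PySem.Chars.isIn em.toList h.toList = true
    · simp [sliceBetweenLoopA, hq, List.findIdx?_cons]
    · cases hft : t.findIdx? (fun l => PySem.Chars.isIn em.toList l.toList) with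
      | none => simp [sliceBetweenLoopA, hq, ih, hft, List.findIdx?_cons]
      | some j =>
        simp [sliceBetweenLoopA, hq, ih, hft, List.findIdx?_cons]
        omega

-- B's inner scan is a takeWhile: take up to the first end-marker line.
theorem sliceBetweenScanB_eq_take (em : String) (xs : List String) :
    sliceBetweenScanB em xs
      = xs.take ((xs.findIdx? (fun l => PySem.Str.isIn em l)).getD xs.length) := by
  induction xs with
  | nil => simp [sliceBetweenScanB]
  | cons h t ih =>
    by_cases hq : PySem.Chars.isIn em.toList h.toList = true
    · simp [sliceBetweenScanB, hq, List.findIdx?_cons]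
    · cases hft : t.findIdx? (fun l => PySem.Chars.isIn em.toList l.toList) with
      | none => simp [sliceBetweenScanB, hq, ih, hft, List.findIdx?_cons]
      | some j => simp [sliceBetweenScanB, hq, ih, hft, List.findIdx?_cons]

-- Characterisation of B: start index = first line containing the start marker,
-- then take up to the first subsequent line containing the end marker.
theorem slice_between_py_alt_eq (sm em : String) (xs : List String) :
    slice_between_py_alt xs sm em
      = match xs.findIdx? (fun l => PySem.Str.isIn sm l) with
        | none => []
        | some s => (xs.drop s).take
            (1 + ((xs.drop (s + 1)).findIdx? (fun l => PySem.Str.isIn em l)).getD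
              (xs.drop (s + 1)).length) := by
  induction xs with
  | nil => simp [slice_between_py_alt]
  | cons h t ih =>
    by_cases hp : PySem.Chars.isIn sm.toList h.toList = true
    · simp [slice_between_py_alt, hp, List.findIdx?_cons, sliceBetweenScanB_eq_take,
        PySem.Str.isIn, Nat.add_comm 1]
    · cases hft : t.findIdx? (fun l => PySem.Chars.isIn sm.toList l.toList) with
      | none => simp [slice_between_py_alt, hp, ih, hft, List.findIdx?_cons]
      | some s => simp [slice_between_py_alt, hp, ih, hft, List.findIdx?_cons]

-- Characterisation of A's loop from the initial state: start is the first index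
-- matching the start marker, end the first subsequent match of the end marker.
theorem sliceBetweenLoopA_none (sm em : String) (xs : List String) (idx : Nat) :
    sliceBetweenLoopA sm em xs idx none
      = match xs.findIdx? (fun l => PySem.Str.isIn sm l) with
        | none => (none, none)
        | some s => (some (idx + s),
            ((xs.drop (s + 1)).findIdx? (fun l => PySem.Str.isIn em l)).map
              (fun j => idx + s + 1 + j)) := by
  induction xs generalizing idx with
  | nil => simp [sliceBetweenLoopA]
  | cons h t ih =>
    by_cases hp : PySem.Chars.isIn sm.toList h.toList = true
    · cases hft : t.findIdx? (fun l => PySem.Chars.isIn em.toList l.toList) with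
      | none => simp [sliceBetweenLoopA, hp, sliceBetweenLoopA_some, hft, List.findIdx?_cons]
      | some j =>
        simp [sliceBetweenLoopA, hp, sliceBetweenLoopA_some, hft, List.findIdx?_cons]
    · cases hft : t.findIdx? (fun l => PySem.Chars.isIn sm.toList l.toList) with
      | none => simp [sliceBetweenLoopA, hp, ih, hft, List.findIdx?_cons]
      | some s =>
        simp [sliceBetweenLoopA, hp, ih, hft, List.findIdx?_cons]
        constructor
        · omega
        · have he : (fun j => idx + 1 + s + 1 + j) = (fun j => idx + (s + 1) + 1 + j) := by
            funext j; omega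
          rw [he]

-- ===== VERDICT =====
theorem slice_between_py_spec : Claim_equal_slice_between_py := by
  intro lines sm em _
  unfold Spec_slice_between_py
  rw [slice_between_py_alt_eq]
  unfold slice_between_py
  rw [sliceBetweenLoopA_none]
  cases hf : lines.findIdx? (fun l => PySem.Str.isIn sm l) with
  | none => simp
  | some s =>
    have hs : s < lines.length := (List.findIdx?_eq_some_iff_findIdx_eq.mp hf).1
    simp only [Nat.zero_add]
    cases hfe : (lines.drop (s + 1)).findIdx? (fun l => PySem.Str.isIn em l) with
    | none =>
      simp only [Option.map_none, Option.getD_none, List.length_drop]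
      rw [PySem.List.slice_natCast]
      congr 1
      omega
    | some j =>
      simp only [Option.map_some, Option.getD_some]
      rw [PySem.List.slice_natCast]
      congr 1
      omega
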